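-- pv_equiv track=rewrite | github.com/yuexian2/Homework-2-3 | HW3 Yingyi Lai & Yue Xian.py | maxiquad
-- ===== SOURCE A (Python) =====
-- def maxiquad (somelist:list):
--     """
--     This is function could figure out the quadrant of the strongest and longest non-zero radius of each sample data
--     :param somelist: the list of the radii for each storm
--     :return: give back the quadrant of strongest and longest non-zero radius
--     """
--     if any(somelist[-1:-5])!=0:
--         maxr=max(somelist[-1:-5])
--         ind = [i + 1 for i, j in enumerate(somelist[-1:-5]) if j == maxr]
--     elif any(somelist[-5:-9])!=0:
--         maxr=max(somelist[-5:-9])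
--         ind = [i + 1 for i, j in enumerate(somelist[-5:-9]) if j == maxr]
--     else:
--         maxr = max(somelist)
--         ind = [i + 1 for i, j in enumerate(somelist) if j == maxr]
--     return ind
-- ===== SOURCE B (Python) =====
-- def maxiquad(somelist: list):
--     best = None
--     ind = []
--     for i, j in enumerate(somelist):
--         if best is None or j > best:
--             best = j
--             ind = [i + 1]
--         elif j == best:
--             ind.append(i + 1)
--     if best is None:
--         raise ValueError("max() arg is an empty sequence")
--     return ind
-- ===== Notes on version B (the rewrite author's own statement) =====
-- stated objective: simpler
-- what changed: A's two dead guard branches (both slices [-1:-5] and [-5:-9] are always empty) are dropped and its max-then-filter two-pass scheme is replaced by a single enumerate pass keeping a running best value and the list of matching 1-based indices (reset on strictly greater, append on equal).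
import Mathlib
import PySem

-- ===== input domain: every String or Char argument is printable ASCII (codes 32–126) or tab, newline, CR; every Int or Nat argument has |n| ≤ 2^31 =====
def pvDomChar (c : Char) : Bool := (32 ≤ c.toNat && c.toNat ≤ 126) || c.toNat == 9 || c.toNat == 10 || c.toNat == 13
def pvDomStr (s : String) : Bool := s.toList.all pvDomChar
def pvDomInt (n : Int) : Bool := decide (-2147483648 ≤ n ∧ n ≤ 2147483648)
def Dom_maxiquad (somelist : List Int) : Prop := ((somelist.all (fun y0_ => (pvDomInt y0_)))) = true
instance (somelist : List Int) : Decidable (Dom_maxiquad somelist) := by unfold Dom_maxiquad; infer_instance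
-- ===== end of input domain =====

-- B drops A's two dead guard branches (the slices [-1:-5] and [-5:-9] are always empty) and
-- replaces its max-then-filter two-pass scheme by one enumerate pass with a running best value
-- and index list (objective: simpler).


-- ===== PORT A =====
-- literal transliteration: both guard slices, the guards 'any(...)!=0' (False != 0 is False,
-- True != 0 is True, so the guard is just any(...)), max (none = ValueError, excluded by Pre_)
-- and the enumerate comprehensions.
def maxiquad (somelist : List Int) : List Int :=
  let s1 := PySem.List.slice somelist (some (-1)) (some (-5))
  if s1.any (fun j => j != 0) then
    match PySem.List.max? s1 (fun y => y) with
    | none => []   -- max([]) raises ValueError; branch excluded by Pre_ (in fact unreachable)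
    | some maxr => ((PySem.List.enumerate s1 0).filter (fun p => p.2 == maxr)).map (fun p => p.1 + 1)
  else
    let s2 := PySem.List.slice somelist (some (-5)) (some (-9))
    if s2.any (fun j => j != 0) then
      match PySem.List.max? s2 (fun y => y) with
      | none => []   -- max([]) raises ValueError; branch excluded by Pre_ (in fact unreachable)
      | some maxr => ((PySem.List.enumerate s2 0).filter (fun p => p.2 == maxr)).map (fun p => p.1 + 1)
    else
      match PySem.List.max? somelist (fun y => y) with
      | none => []   -- max([]) raises ValueError on the empty somelist; excluded by Pre_
      | some maxr => ((PySem.List.enumerate somelist 0).filter (fun p => p.2 == maxr)).map (fun p => p.1 + 1)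

-- ===== PORT B =====
-- one pass: running best (none before the first element) and the 1-based indices matching it.
def maxiquadStep (st : Option Int × List Int) (p : Int × Int) : Option Int × List Int :=
  match st with
  | (none, _) => (some p.2, [p.1 + 1])
  | (some b, ind) =>
    if p.2 > b then (some p.2, [p.1 + 1])
    else if p.2 == b then (some b, ind ++ [p.1 + 1])
    else (some b, ind)

def maxiquad_alt (somelist : List Int) : List Int :=
  let st := (PySem.List.enumerate somelist 0).foldl maxiquadStep (none, [])
  match st.1 with
  | none => []   -- raise ValueError on the empty list; excluded by Pre_
  | some _ => st.2

-- ===== PRECONDITION & SPEC =====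
-- Pre_ excludes only the empty list, on which both A (via max([])) and B raise ValueError.
def Pre_maxiquad (somelist : List Int) : Prop := somelist ≠ []
instance (somelist : List Int) : Decidable (Pre_maxiquad somelist) := by unfold Pre_maxiquad; infer_instance
def pvWitness_maxiquad : List Int := [3, 1, 3, 2]

def Spec_maxiquad (somelist : List Int) (out : List Int) : Prop := out = maxiquad_alt somelist
instance (somelist : List Int) (out : List Int) : Decidable (Spec_maxiquad somelist out) := by unfold Spec_maxiquad; infer_instance

-- ===== CLAIM (what is proved, stated in full; the proofs are below) =====
def Claim_equal_maxiquad : Prop := ∀ (somelist : List Int), Dom_maxiquad somelist → Pre_maxiquad somelist → Spec_maxiquad somelist (maxiquad somelist)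

-- ===== LEMMAS AND PROOFS =====

-- A's first guard slice somelist[-1:-5] is empty for every list
lemma sliceA_nil (l : List Int) : PySem.List.slice l (some (-1)) (some (-5)) = [] := by
  apply List.eq_nil_of_length_eq_zero
  rw [PySem.List.length_slice, PySem.List.clampIdx_neg_one,
      PySem.List.clampIdx_neg_ofNat l.length 5 (by omega)]
  omega

-- A's second guard slice somelist[-5:-9] is empty for every list
lemma sliceB_nil (l : List Int) : PySem.List.slice l (some (-5)) (some (-9)) = [] := by
  apply List.eq_nil_of_length_eq_zero
  rw [PySem.List.length_slice, PySem.List.clampIdx_neg_ofNat l.length 5 (by omega),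
      PySem.List.clampIdx_neg_ofNat l.length 9 (by omega)]
  omega

-- loop invariant for B's fold: after a first element the state is the running max of what was
-- seen, and the index list is the (possibly kept) prefix plus the 1-based positions of the max
lemma fold_invariant (l : List Int) (s b : Int) (ind : List Int) :
    (PySem.List.enumerate l s).foldl maxiquadStep (some b, ind) =
      (some (l.foldl max b),
        (if b = l.foldl max b then ind else []) ++
          ((PySem.List.enumerate l s).filter (fun p => p.2 == l.foldl max b)).map (fun p => p.1 + 1)) := by
  induction l generalizing s b ind with
  | nil => simp [PySem.List.enumerate_nil]
  | cons x t ih =>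
    rw [PySem.List.enumerate_cons]
    simp only [List.filter_cons, List.foldl]
    have hM := PySem.List.le_foldl_max t (max b x)
    rcases lt_trichotomy x b with hlt | heq | hgt
    · have hstep : maxiquadStep (some b, ind) (s, x) = (some b, ind) := by
        simp [maxiquadStep, not_lt.mpr hlt.le, hlt.ne]
      have hbx : max b x = b := max_eq_left hlt.le
      rw [hstep, ih]
      simp only [hbx] at hM ⊢
      have hxM : (x == t.foldl max b) = false := by
        rw [beq_eq_false_iff_ne]
        intro h
        have := hM.1
        omega
      simp [hxM]
    · subst heq
      have hstep : maxiquadStep (some x, ind) (s, x) = (some x, ind ++ [s + 1]) := by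
        simp [maxiquadStep]
      rw [hstep, ih]
      simp only [max_self] at hM ⊢
      by_cases hxM : x = t.foldl max x
      · simp [← hxM]
      · simp [hxM]
    · have hstep : maxiquadStep (some b, ind) (s, x) = (some x, [s + 1]) := by
        simp [maxiquadStep, hgt]
      have hbx : max b x = x := max_eq_right hgt.le
      rw [hstep, ih]
      simp only [hbx] at hM ⊢
      have hbM : ¬ (b = t.foldl max x) := by
        intro h
        have := hM.1
        omega
      by_cases hxM : x = t.foldl max x
      · simp [← hxM, hgt.ne]
      · simp [hxM, hbM]

-- ===== VERDICT (by name: the statement is the Claim_ definition above) =====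
theorem maxiquad_spec : Claim_equal_maxiquad := by
  intro somelist _ hpre
  unfold Spec_maxiquad
  cases somelist with
  | nil => exact absurd rfl hpre
  | cons x t =>
    unfold maxiquad maxiquad_alt
    rw [sliceA_nil, sliceB_nil]
    simp only [List.any_nil, Bool.false_eq_true, if_false]
    rw [PySem.List.max?_id_cons, PySem.List.enumerate_cons]
    simp only [List.foldl_cons, maxiquadStep]
    rw [fold_invariant]
    simp only [List.filter_cons]
    by_cases hxM : x = t.foldl max x
    · simp [← hxM]
    · simp [hxM]
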